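-- pv_equiv track=rewrite | github.com/pypi-data/pypi-mirror-199 | packages/ceotr-config/ceotr_config-1.0.6.tar.gz/ceotr_config-1.0.6/ceotr_config/config_handler.py | compare_and_merge_yamls
-- ===== SOURCE A (Python) =====
-- def compare_and_merge_yamls(tpl_yml, target_yml):
--     difference = False
--     for tpl_key, tpl_value in tpl_yml.items():
--         if target_yml and tpl_key in target_yml:
--             target_value = target_yml[tpl_key]
--             for tpl_value_key in tpl_value:
--                 if tpl_value_key in target_value:
--                     tpl_value[tpl_value_key] = target_value[tpl_value_key]
--                 else:
--                     difference = True
--         else: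
--             difference = True
--
--     if difference:
--         return tpl_yml
--     else:
--         return False
-- ===== SOURCE B (Python) =====
-- # B: pure two-pass rewrite — a comprehension builds the merged dict (no mutation of
-- # tpl_yml, unlike A, which mutates it in place; return values are equal), and the
-- # difference flag becomes a separate all()-completeness predicate.
-- def compare_and_merge_yamls(tpl_yml, target_yml):
--     tgt = target_yml if target_yml else {}
--     merged = {
--         k: ({ik: tgt[k].get(ik, iv) for ik, iv in v.items()} if k in tgt else v)
--         for k, v in tpl_yml.items()
--     }
--     complete = all(
--         target_yml and k in target_yml and all(ik in target_yml[k] for ik in v)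
--         for k, v in tpl_yml.items()
--     )
--     return False if complete else merged
-- ===== Notes on version B (the rewrite author's own statement) =====
-- stated objective: idiomatic
-- what changed: A interleaves merging and a difference flag in one mutating loop; B builds the merged dict purely with nested comprehensions using .get defaults and computes the difference as a separate all()-completeness predicate (B does not mutate tpl_yml; return values are equal). Pre_ excludes inputs where the target fully covers the template, on which A returns the bool False instead of a dict.
-- outside the precondition, e.g. on compare_and_merge_yamls({}, None): A returns False, B returns False; on compare_and_merge_yamls({'a': {'x': '1'}}, {'a': {'x': '2'}}): A returns False, B returns False
import Mathlib
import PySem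

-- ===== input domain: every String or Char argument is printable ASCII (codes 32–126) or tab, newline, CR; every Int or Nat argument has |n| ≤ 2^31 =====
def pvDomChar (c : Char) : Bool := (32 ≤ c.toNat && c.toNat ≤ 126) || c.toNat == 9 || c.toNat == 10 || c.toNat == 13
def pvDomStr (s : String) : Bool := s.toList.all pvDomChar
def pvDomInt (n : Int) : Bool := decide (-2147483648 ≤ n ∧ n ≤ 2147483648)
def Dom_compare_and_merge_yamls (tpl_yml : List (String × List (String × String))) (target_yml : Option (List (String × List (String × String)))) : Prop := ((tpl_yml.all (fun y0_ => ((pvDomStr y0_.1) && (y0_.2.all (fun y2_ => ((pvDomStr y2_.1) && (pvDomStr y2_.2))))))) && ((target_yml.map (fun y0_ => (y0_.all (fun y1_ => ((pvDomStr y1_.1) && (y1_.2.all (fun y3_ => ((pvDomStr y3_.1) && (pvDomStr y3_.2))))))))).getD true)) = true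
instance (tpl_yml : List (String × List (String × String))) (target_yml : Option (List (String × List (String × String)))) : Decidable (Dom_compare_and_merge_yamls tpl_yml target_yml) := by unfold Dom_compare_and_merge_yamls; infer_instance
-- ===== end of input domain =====

-- ===== PORT A =====
-- one honest line: B rebuilds the merged dict purely (comprehensions + .get defaults) and
-- computes the difference flag as a separate completeness predicate; A mutates tpl_yml in
-- place — the equivalence proved here is about the RETURN value only.

-- first-match lookup on an association list (Python dict lookup)
def dget? {α : Type} (d : List (String × α)) (k : String) : Option α :=
  match d with
  | [] => none
  | (k', v) :: rest => if k' = k then some v else dget? rest k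

-- overwrite-in-place assignment d[k] = x (Python dict assignment; new keys append)
def dset {α : Type} (d : List (String × α)) (k : String) (x : α) : List (String × α) :=
  match d with
  | [] => [(k, x)]
  | (k', v) :: rest => if k' = k then (k, x) :: rest else (k', v) :: dset rest k x

-- literal transliteration of A: one fold carrying (accumulated tpl_yml, difference flag)
def compare_and_merge_yamls (tpl_yml : List (String × List (String × String))) (target_yml : Option (List (String × List (String × String)))) : Option (List (String × List (String × String))) :=
  let st := tpl_yml.foldl (fun (st : List (String × List (String × String)) × Bool) kv =>
    match target_yml with
    | none => (st.1 ++ [kv], true)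
    | some t =>
      if t.isEmpty then (st.1 ++ [kv], true)
      else
        match dget? t kv.1 with
        | none => (st.1 ++ [kv], true)
        | some tv =>
          let inner := kv.2.foldl (fun (s : List (String × String) × Bool) p =>
              match dget? tv p.1 with
              | some x => (dset s.1 p.1 x, s.2)
              | none => (s.1, true)) (kv.2, st.2)
          (st.1 ++ [(kv.1, inner.1)], inner.2)) ([], false)
  if st.2 then some st.1 else none

-- ===== PORT B =====
-- B-side helpers: merged entry (comprehension with .get default) and completeness predicate
def mergedEntry (tgt : List (String × List (String × String))) (kv : String × List (String × String)) : String × List (String × String) :=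
  (kv.1, match dget? tgt kv.1 with
    | some tv => kv.2.map (fun p => (p.1, (dget? tv p.1).getD p.2))
    | none => kv.2)

def entryComplete (target_yml : Option (List (String × List (String × String)))) (kv : String × List (String × String)) : Bool :=
  match target_yml with
  | none => false
  | some t =>
    !t.isEmpty &&
      (match dget? t kv.1 with
       | some tv => kv.2.all (fun p => (dget? tv p.1).isSome)
       | none => false)

def compare_and_merge_yamls_alt (tpl_yml : List (String × List (String × String))) (target_yml : Option (List (String × List (String × String)))) : Option (List (String × List (String × String))) :=
  let tgt := match target_yml with
    | none => []
    | some t => t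
  let merged := tpl_yml.map (mergedEntry tgt)
  let complete := tpl_yml.all (entryComplete target_yml)
  if complete then none else some merged

-- ===== PRECONDITION & SPEC =====
-- Pre_ (i) restricts the inner association lists of tpl_yml to duplicate-free keys (these lists
-- stand for Python dicts, which cannot hold a duplicate key, so duplicate-key lists represent no
-- Python input), and (ii) excludes the inputs on which the target fully covers the template:
-- there A returns the bool False, which is not a value of the declared Optional[dict] return type.
-- an entry of the template is covered: target is non-empty, has the key, and has every inner key
def tplEntryCovered (target_yml : Option (List (String × List (String × String)))) (kv : String × List (String × String)) : Bool :=
  match target_yml with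
  | none => false
  | some t =>
    !t.isEmpty &&
      (match dget? t kv.1 with
       | some tv => kv.2.all (fun p => (dget? tv p.1).isSome)
       | none => false)

def Pre_compare_and_merge_yamls (tpl_yml : List (String × List (String × String))) (target_yml : Option (List (String × List (String × String)))) : Prop :=
  (∀ kv ∈ tpl_yml, (kv.2.map Prod.fst).Nodup) ∧
  ¬ (tpl_yml.all (tplEntryCovered target_yml)) = true
instance (tpl_yml : List (String × List (String × String))) (target_yml : Option (List (String × List (String × String)))) : Decidable (Pre_compare_and_merge_yamls tpl_yml target_yml) := by unfold Pre_compare_and_merge_yamls; infer_instance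

def pvWitness_compare_and_merge_yamls : (List (String × List (String × String))) × (Option (List (String × List (String × String)))) :=
  ([("a", [("x", "1"), ("y", "2")])], some [("a", [("x", "9")])])

def Spec_compare_and_merge_yamls (tpl_yml : List (String × List (String × String))) (target_yml : Option (List (String × List (String × String)))) (out : Option (List (String × List (String × String)))) : Prop := out = compare_and_merge_yamls_alt tpl_yml target_yml
instance (tpl_yml : List (String × List (String × String))) (target_yml : Option (List (String × List (String × String)))) (out : Option (List (String × List (String × String)))) : Decidable (Spec_compare_and_merge_yamls tpl_yml target_yml out) := by unfold Spec_compare_and_merge_yamls; infer_instance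

-- ===== CLAIM (what is proved, stated in full; the proofs are below) =====
def Claim_equal_compare_and_merge_yamls : Prop := ∀ (tpl_yml : List (String × List (String × String))) (target_yml : Option (List (String × List (String × String)))), Dom_compare_and_merge_yamls tpl_yml target_yml → Pre_compare_and_merge_yamls tpl_yml target_yml → Spec_compare_and_merge_yamls tpl_yml target_yml (compare_and_merge_yamls tpl_yml target_yml)

-- ===== LEMMAS AND PROOFS =====

-- proof-only helpers: named forms of A's fold steps (definitionally equal to the port's lambdas)
def updStep (tv : List (String × String)) (a : List (String × String)) (p : String × String) : List (String × String) :=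
  match dget? tv p.1 with
  | some y => dset a p.1 y
  | none => a

def innerStepA (tv : List (String × String)) (s : List (String × String) × Bool) (p : String × String) : List (String × String) × Bool :=
  match dget? tv p.1 with
  | some x => (dset s.1 p.1 x, s.2)
  | none => (s.1, true)

def stepA (target_yml : Option (List (String × List (String × String)))) (st : List (String × List (String × String)) × Bool) (kv : String × List (String × String)) : List (String × List (String × String)) × Bool :=
  match target_yml, kv with
  | none, kv => (st.1 ++ [kv], true)
  | some t, kv =>
    if t.isEmpty then (st.1 ++ [kv], true)
    else
      match dget? t kv.1 with
      | none => (st.1 ++ [kv], true)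
      | some tv =>
        let inner := kv.2.foldl (innerStepA tv) (kv.2, st.2)
        (st.1 ++ [(kv.1, inner.1)], inner.2)

theorem A_as_step (tpl_yml : List (String × List (String × String))) (target_yml : Option (List (String × List (String × String)))) :
    compare_and_merge_yamls tpl_yml target_yml
    = (if (tpl_yml.foldl (stepA target_yml) ([], false)).2
       then some ((tpl_yml.foldl (stepA target_yml) ([], false)).1) else none) := by
  unfold compare_and_merge_yamls stepA innerStepA
  rfl

theorem any_not_eq_not_all {α : Type} (l : List α) (f : α → Bool) :
    (l.any fun x => !f x) = !l.all f := by
  induction l with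
  | nil => rfl
  | cons x l ih => simp [ih, Bool.not_and]

theorem anyNone_eq (tv : List (String × String)) (l : List (String × String)) :
    (l.any fun p => (dget? tv p.1).isNone) = !l.all fun p => (dget? tv p.1).isSome := by
  induction l with
  | nil => rfl
  | cons p l ih => cases h : dget? tv p.1 <;> simp [h, ih]

theorem innerFold_split (tv : List (String × String)) (ps : List (String × String)) (acc : List (String × String)) (d : Bool) :
    ps.foldl (innerStepA tv) (acc, d)
    = (ps.foldl (updStep tv) acc, d || ps.any (fun p => (dget? tv p.1).isNone)) := by
  induction ps generalizing acc d with
  | nil => simp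
  | cons p ps ih =>
    cases hg : dget? tv p.1 <;>
      simp [List.foldl_cons, List.any_cons, innerStepA, updStep, hg, ih]

theorem updFold_cons_skip (tv : List (String × String)) (ps : List (String × String)) (k : String) (x : String) (acc : List (String × String))
    (h : ∀ p ∈ ps, p.1 ≠ k) :
    ps.foldl (updStep tv) ((k, x) :: acc) = (k, x) :: ps.foldl (updStep tv) acc := by
  induction ps generalizing acc with
  | nil => rfl
  | cons p ps ih =>
    have hk : p.1 ≠ k := h p (List.mem_cons_self ..)
    have hrest : ∀ q ∈ ps, q.1 ≠ k := fun q hq => h q (List.mem_cons_of_mem _ hq)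
    cases hg : dget? tv p.1 with
    | none =>
      simp only [List.foldl_cons, updStep, hg]
      exact ih _ hrest
    | some y =>
      simp only [List.foldl_cons, updStep, hg]
      rw [show dset ((k, x) :: acc) p.1 y = (k, x) :: dset acc p.1 y from by
        simp [dset, Ne.symm hk]]
      exact ih _ hrest

theorem updFold_self (tv : List (String × String)) (v : List (String × String))
    (hnd : (v.map Prod.fst).Nodup) :
    v.foldl (updStep tv) v = v.map (fun p => (p.1, (dget? tv p.1).getD p.2)) := by
  induction v with
  | nil => rfl
  | cons p vs ih =>
    obtain ⟨pk, pv⟩ := p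
    simp only [List.map_cons, List.nodup_cons, List.mem_map] at hnd
    have hskip : ∀ q ∈ vs, q.1 ≠ pk := by
      intro q hq heq
      exact hnd.1 ⟨q, hq, heq⟩
    cases hg : dget? tv pk with
    | none =>
      simp only [List.foldl_cons, updStep, hg]
      rw [updFold_cons_skip tv vs pk pv vs hskip, ih hnd.2]
      simp [hg]
    | some y =>
      simp only [List.foldl_cons, updStep, hg]
      rw [show dset ((pk, pv) :: vs) pk y = (pk, y) :: vs from by simp [dset]]
      rw [updFold_cons_skip tv vs pk y vs hskip, ih hnd.2]
      simp [hg]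

theorem stepA_eq (target_yml : Option (List (String × List (String × String))))
    (st : List (String × List (String × String)) × Bool) (kv : String × List (String × String))
    (hnd : (kv.2.map Prod.fst).Nodup) :
    stepA target_yml st kv
    = (st.1 ++ [mergedEntry (match target_yml with | none => [] | some t => t) kv],
       st.2 || !entryComplete target_yml kv) := by
  cases target_yml with
  | none => simp [stepA, mergedEntry, entryComplete, dget?]
  | some t =>
    by_cases ht : t.isEmpty
    · have : t = [] := by cases t <;> simp_all
      subst this
      simp [stepA, mergedEntry, entryComplete, dget?]
    · have hf : t.isEmpty = false := by simpa using ht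
      cases hg : dget? t kv.1 with
      | none => simp [stepA, mergedEntry, entryComplete, hg, hf]
      | some tv =>
        simp only [stepA, hf, Bool.false_eq_true, if_false, hg,
          innerFold_split, updFold_self tv kv.2 hnd]
        simp [mergedEntry, entryComplete, hg, hf, anyNone_eq]

theorem outerFold_split (target_yml : Option (List (String × List (String × String))))
    (l : List (String × List (String × String)))
    (acc : List (String × List (String × String))) (d : Bool)
    (hnd : ∀ kv ∈ l, (kv.2.map Prod.fst).Nodup) :
    l.foldl (stepA target_yml) (acc, d)
    = (acc ++ l.map (mergedEntry (match target_yml with | none => [] | some t => t)),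
       d || l.any (fun kv => !entryComplete target_yml kv)) := by
  induction l generalizing acc d with
  | nil => simp
  | cons kv l ih =>
    rw [List.foldl_cons, stepA_eq target_yml (acc, d) kv (hnd kv (List.mem_cons_self ..)),
      ih _ _ (fun q hq => hnd q (List.mem_cons_of_mem _ hq))]
    simp [Bool.or_assoc]

-- ===== VERDICT (by name: the statement is the Claim_ definition above) =====
theorem compare_and_merge_yamls_spec : Claim_equal_compare_and_merge_yamls := by
  intro tpl_yml target_yml _ hpre
  obtain ⟨hnd, hinc⟩ := hpre
  have hc : tplEntryCovered target_yml = entryComplete target_yml := by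
    funext kv; cases target_yml <;> rfl
  rw [hc] at hinc
  have h : tpl_yml.all (entryComplete target_yml) = false := by
    cases hh : tpl_yml.all (entryComplete target_yml)
    · rfl
    · exact absurd hh hinc
  unfold Spec_compare_and_merge_yamls compare_and_merge_yamls_alt
  rw [A_as_step, outerFold_split target_yml tpl_yml [] false hnd]
  simp [h, any_not_eq_not_all]
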